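-- pv_equiv track=rewrite | github.com/batumoglu/Python_Algorithms | Codility/CountValues.py | solution
-- ===== SOURCE A (Python) =====
-- def solution(A):
--     # write your code in Python 3.6
--     bag = set()
--     last = 0
--
--     for i in range(len(A)):
--         if A[i] not in bag:
--             bag.add(A[i])
--             last = i
--     return last
-- ===== SOURCE B (Python) =====
-- def solution(A):
--     # phase 1: table of each value's first-occurrence index; phase 2: reduce with max
--     first = {}
--     for i, x in enumerate(A):
--         first.setdefault(x, i)
--     return max(first.values(), default=0)
-- ===== Notes on version B (the rewrite author's own statement) =====
-- stated objective: alternative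
-- what changed: A tracks a growing set and a running 'last' index inline in one indexed loop; B separates table-building from reduction: it builds a dict mapping each value to its first-occurrence index (setdefault over enumerate) and then returns max(first.values(), default=0).
import Mathlib
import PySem

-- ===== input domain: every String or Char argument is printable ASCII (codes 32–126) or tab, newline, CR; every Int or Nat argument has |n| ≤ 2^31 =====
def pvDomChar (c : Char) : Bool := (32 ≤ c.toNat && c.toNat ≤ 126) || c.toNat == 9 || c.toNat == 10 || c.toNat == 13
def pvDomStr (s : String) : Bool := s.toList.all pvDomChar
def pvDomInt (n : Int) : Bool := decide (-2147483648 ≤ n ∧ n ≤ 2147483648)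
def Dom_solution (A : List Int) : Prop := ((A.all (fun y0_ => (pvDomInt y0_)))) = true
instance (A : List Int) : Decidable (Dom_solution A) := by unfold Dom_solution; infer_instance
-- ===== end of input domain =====

-- B replaces A's inline (bag, last) tracking loop by a set-then-reduce formulation:
-- max of the first-occurrence index of each distinct value (default 0); objective: alternative.

-- ===== PORT A =====
-- A's loop over range(len(A)) with state (bag, last); A[i] is always in range here, ported as pyGetD with default 0.
def solution (A : List Int) : Int :=
  ((PySem.List.pyRange 0 (A.length : Int) 1).foldl
    (fun s i =>
      let v := PySem.List.pyGetD A i 0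
      if PySem.Set.contains s.1 v then s else (PySem.Set.add s.1 v, i))
    ((PySem.Set.empty : PySem.Set Int), (0 : Int))).2

-- ===== PORT B =====
-- phase 1: dict of first-occurrence indices via setdefault over enumerate; phase 2: max(values, default=0).
def solution_alt (A : List Int) : Int :=
  let first : PySem.Dict Int Int :=
    (PySem.List.enumerate A).foldl (fun d p => PySem.Dict.setdefault d p.2 p.1) PySem.Dict.empty
  (PySem.List.max? (PySem.Dict.values first) (fun y => y)).getD 0

-- ===== PRECONDITION & SPEC =====
def Spec_solution (A : List Int) (out : Int) : Prop := out = solution_alt A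
instance (A : List Int) (out : Int) : Decidable (Spec_solution A out) := by unfold Spec_solution; infer_instance

-- ===== CLAIM (what is proved, stated in full; the proofs are below) =====
def Claim_equal_solution : Prop := ∀ (A : List Int), Dom_solution A → Spec_solution A (solution A)

-- ===== LEMMAS AND PROOFS =====

-- A's loop as a named function (definitionally the loop inside `solution`)
def pvLoop (A : List Int) : PySem.Set Int × Int :=
  (PySem.List.pyRange 0 (A.length : Int) 1).foldl
    (fun s i =>
      let v := PySem.List.pyGetD A i 0
      if PySem.Set.contains s.1 v then s else (PySem.Set.add s.1 v, i))
    ((PySem.Set.empty : PySem.Set Int), (0 : Int))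

lemma solution_eq_pvLoop (A : List Int) : solution A = (pvLoop A).2 := rfl

-- the loop body over A ++ [x] agrees with the one over A on the prefix indices
lemma pvLoop_prefix (A : List Int) (x : Int) (init : PySem.Set Int × Int) :
    (PySem.List.pyRange 0 (A.length : Int) 1).foldl
      (fun s i =>
        let v := PySem.List.pyGetD (A ++ [x]) i 0
        if PySem.Set.contains s.1 v then s else (PySem.Set.add s.1 v, i)) init
    = (PySem.List.pyRange 0 (A.length : Int) 1).foldl
      (fun s i =>
        let v := PySem.List.pyGetD A i 0
        if PySem.Set.contains s.1 v then s else (PySem.Set.add s.1 v, i)) init := by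
  apply PySem.List.foldl_congr_mem
  intro acc i hi
  rw [PySem.List.mem_pyRange_one] at hi
  obtain ⟨h0, hlt⟩ := hi
  have hn : i = ((i.toNat : Nat) : Int) := by omega
  have hlt' : i.toNat < A.length := by omega
  rw [hn, PySem.List.pyGetD_natCast, PySem.List.pyGetD_natCast,
    List.getD_eq_getElem?_getD, List.getD_eq_getElem?_getD,
    List.getElem?_append_left hlt']

lemma pvLoop_snoc (A : List Int) (x : Int) :
    pvLoop (A ++ [x])
      = if PySem.Set.contains (pvLoop A).1 x then pvLoop A
        else (PySem.Set.add (pvLoop A).1 x, (A.length : Int)) := by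
  have hlen : ((A ++ [x]).length : Int) = (A.length : Int) + 1 := by simp
  unfold pvLoop
  rw [hlen, PySem.List.pyRange_one_succ_right (by positivity), List.foldl_append,
    pvLoop_prefix]
  have hx : PySem.List.pyGetD (A ++ [x]) (A.length : Int) 0 = x := by
    rw [PySem.List.pyGetD_natCast]
    simp
  simp only [List.foldl_cons, List.foldl_nil, hx]

lemma pvLoop_fst (A : List Int) : (pvLoop A).1 = PySem.Set.ofList A := by
  induction A using List.reverseRecOn with
  | nil => rfl
  | append_singleton A x ih =>
      rw [pvLoop_snoc]
      have hof : PySem.Set.ofList (A ++ [x]) = PySem.Set.add (PySem.Set.ofList A) x := by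
        simp [PySem.Set.ofList_eq_foldl]
      by_cases hmem : x ∈ A
      · rw [if_pos (by rw [ih, PySem.Set.contains_iff, PySem.Set.mem_ofList]; exact hmem),
          ih, hof]
        unfold PySem.Set.add
        rw [if_pos (by rw [PySem.Set.contains_iff, PySem.Set.mem_ofList]; exact hmem)]
      · rw [if_neg (by rw [ih, PySem.Set.contains_iff, PySem.Set.mem_ofList]; simpa using hmem),
          hof, ih]

-- every index produced by B is < A.length
lemma idx_lt (A : List Int) (y : Int) (hy : y ∈ A) :
    (((PySem.List.index? A y).getD 0 : Nat) : Int) < (A.length : Int) := by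
  obtain ⟨k, hk⟩ := Option.isSome_iff_exists.mp ((PySem.List.index?_isSome_iff A y).mpr hy)
  obtain ⟨hlt, -, -⟩ := PySem.List.getElem_of_index?_eq_some hk
  rw [hk]
  exact_mod_cast hlt

lemma max_append_big (l : List Int) (L : Int) (h : ∀ y ∈ l, y ≤ L) :
    (PySem.List.max? (l ++ [L]) (fun y => y)).getD 0 = L := by
  cases l with
  | nil => rw [List.nil_append, PySem.List.max?_id_cons]; simp
  | cons a t =>
      rw [List.cons_append, PySem.List.max?_id_cons, List.foldl_append]
      simp only [List.foldl_cons, List.foldl_nil, Option.getD_some]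
      have : t.foldl max a ≤ L := by
        rcases PySem.List.foldl_max_mem t a with h1 | h1
        · rw [h1]; exact h a (by simp)
        · exact h _ (by simp [h1])
      exact max_eq_right this

-- B's dict written out: distinct values paired with their first-occurrence index, in first-occurrence order
def pvItems (A : List Int) : List (Int × Int) :=
  (PySem.Set.ofList A).map (fun y => (y, (((PySem.List.index? A y).getD 0 : Nat) : Int)))

lemma enumerate_append_singleton (A : List Int) (x : Int) (s : Int) :
    PySem.List.enumerate (A ++ [x]) s = PySem.List.enumerate A s ++ [((s + A.length : Int), x)] := by
  induction A generalizing s with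
  | nil => simp [PySem.List.enumerate_nil, PySem.List.enumerate_cons]
  | cons a t ih => simp [PySem.List.enumerate_cons, ih]; ring_nf

def pvFirst (A : List Int) : PySem.Dict Int Int :=
  (PySem.List.enumerate A).foldl (fun d p => PySem.Dict.setdefault d p.2 p.1) PySem.Dict.empty

lemma pvFirst_items (A : List Int) : (pvFirst A).items = pvItems A := by
  induction A using List.reverseRecOn with
  | nil => rfl
  | append_singleton A x ih =>
      unfold pvFirst at ih ⊢
      rw [enumerate_append_singleton, List.foldl_append]
      simp only [List.foldl_cons, List.foldl_nil, zero_add]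
      have hkeys : ((PySem.List.enumerate A).foldl
          (fun d p => PySem.Dict.setdefault d p.2 p.1) PySem.Dict.empty).keys
          = PySem.Set.ofList A := by
        unfold PySem.Dict.keys
        rw [ih]
        unfold pvItems
        rw [List.map_map]
        simp [Function.comp_def]
      have hcont : ((PySem.List.enumerate A).foldl
          (fun d p => PySem.Dict.setdefault d p.2 p.1) PySem.Dict.empty).contains x
          = decide (x ∈ A) := by
        rw [PySem.Dict.contains_eq_decide_mem_keys, hkeys]
        simp [PySem.Set.mem_ofList]
      have hof : PySem.Set.ofList (A ++ [x]) = PySem.Set.add (PySem.Set.ofList A) x := by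
        simp [PySem.Set.ofList_eq_foldl]
      have hmap : (PySem.Set.ofList A).map
            (fun y => (y, (((PySem.List.index? (A ++ [x]) y).getD 0 : Nat) : Int)))
          = (PySem.Set.ofList A).map
            (fun y => (y, (((PySem.List.index? A y).getD 0 : Nat) : Int))) := by
        apply List.map_congr_left
        intro y hy
        rw [PySem.List.index?_append_of_mem _ ((PySem.Set.mem_ofList A y).mp hy)]
      set d := (PySem.List.enumerate A).foldl
        (fun d p => PySem.Dict.setdefault d p.2 p.1) PySem.Dict.empty with hd
      unfold PySem.Dict.setdefault
      by_cases hmem : x ∈ A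
      · rw [if_pos (by rw [hcont]; simpa using hmem), ih]
        unfold pvItems
        rw [hof]
        have hadd : PySem.Set.add (PySem.Set.ofList A) x = PySem.Set.ofList A := by
          unfold PySem.Set.add
          rw [if_pos (by rw [PySem.Set.contains_iff, PySem.Set.mem_ofList]; exact hmem)]
        rw [hadd, hmap]
      · rw [if_neg (by rw [hcont]; simpa using hmem)]
        show d.items ++ [(x, (A.length : Int))] = pvItems (A ++ [x])
        rw [hd, ih]
        unfold pvItems
        rw [hof]
        have hadd : PySem.Set.add (PySem.Set.ofList A) x = PySem.Set.ofList A ++ [x] := by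
          unfold PySem.Set.add
          rw [if_neg (by rw [PySem.Set.contains_iff, PySem.Set.mem_ofList]; simpa using hmem)]
        rw [hadd, List.map_append, List.map_singleton, hmap,
          PySem.List.index?_append_singleton_self A x hmem]
        simp

lemma alt_eq_idxs (A : List Int) :
    solution_alt A
      = (PySem.List.max?
          ((PySem.Set.ofList A).map (fun x => (((PySem.List.index? A x).getD 0 : Nat) : Int)))
          (fun y => y)).getD 0 := by
  unfold solution_alt
  show (PySem.List.max? (PySem.Dict.values (pvFirst A)) (fun y => y)).getD 0 = _
  unfold PySem.Dict.values
  rw [pvFirst_items]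
  unfold pvItems
  rw [List.map_map]
  simp [Function.comp_def]

lemma alt_snoc (A : List Int) (x : Int) :
    solution_alt (A ++ [x]) = if x ∈ A then solution_alt A else (A.length : Int) := by
  rw [alt_eq_idxs, alt_eq_idxs]
  have hof : PySem.Set.ofList (A ++ [x]) = PySem.Set.add (PySem.Set.ofList A) x := by
    simp [PySem.Set.ofList_eq_foldl]
  have hmap : (PySem.Set.ofList A).map
        (fun y => (((PySem.List.index? (A ++ [x]) y).getD 0 : Nat) : Int))
      = (PySem.Set.ofList A).map
        (fun y => (((PySem.List.index? A y).getD 0 : Nat) : Int)) := by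
    apply List.map_congr_left
    intro y hy
    rw [PySem.List.index?_append_of_mem _ ((PySem.Set.mem_ofList A y).mp hy)]
  by_cases hmem : x ∈ A
  · have hadd : PySem.Set.add (PySem.Set.ofList A) x = PySem.Set.ofList A := by
      unfold PySem.Set.add
      rw [if_pos (by rw [PySem.Set.contains_iff, PySem.Set.mem_ofList]; exact hmem)]
    rw [hof, hadd, hmap, if_pos hmem]
  · have hadd : PySem.Set.add (PySem.Set.ofList A) x = PySem.Set.ofList A ++ [x] := by
      unfold PySem.Set.add
      rw [if_neg (by rw [PySem.Set.contains_iff, PySem.Set.mem_ofList]; simpa using hmem)]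
    rw [hof, hadd, List.map_append, List.map_singleton, hmap, if_neg hmem,
      PySem.List.index?_append_singleton_self A x hmem]
    simp only [Option.getD_some]
    apply max_append_big
    intro y hy
    simp only [List.mem_map] at hy
    obtain ⟨z, hz, rfl⟩ := hy
    exact le_of_lt (idx_lt A z ((PySem.Set.mem_ofList A z).mp hz))

lemma solution_eq_alt (A : List Int) : solution A = solution_alt A := by
  induction A using List.reverseRecOn with
  | nil => rfl
  | append_singleton A x ih =>
      rw [solution_eq_pvLoop, pvLoop_snoc, alt_snoc]
      by_cases hmem : x ∈ A
      · rw [if_pos (by rw [pvLoop_fst, PySem.Set.contains_iff, PySem.Set.mem_ofList]; exact hmem),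
          if_pos hmem, ← solution_eq_pvLoop, ih]
      · rw [if_neg (by rw [pvLoop_fst, PySem.Set.contains_iff, PySem.Set.mem_ofList]; simpa using hmem),
          if_neg hmem]

-- ===== VERDICT (by name: the statement is the Claim_ definition above) =====
theorem solution_spec : Claim_equal_solution := fun A _ => solution_eq_alt A
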